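-- pv_equiv track=rewrite | github.com/bsommers/npcat | netcapanalysis/analyzer.py | get_length_distribution
-- ===== SOURCE A (Python) =====
-- def get_length_distribution(stats):
--     """Get packet length distribution"""
--     lengths = stats.get("lengths", [])
--     if not lengths:
--         return {}
--
--     bins = {
--         "0-100": 0,
--         "101-500": 0,
--         "501-1000": 0,
--         "1001-1500": 0,
--         "1500+": 0,
--     }
--
--     for length in lengths:
--         if length <= 100:
--             bins["0-100"] += 1
--         elif length <= 500:
--             bins["101-500"] += 1
--         elif length <= 1000:
--             bins["501-1000"] += 1
--         elif length <= 1500: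
--             bins["1001-1500"] += 1
--         else:
--             bins["1500+"] += 1
--
--     return bins
-- ===== SOURCE B (Python) =====
-- def get_length_distribution(stats):
--     """Get packet length distribution"""
--     lengths = stats.get("lengths", [])
--     if not lengths:
--         return {}
--     return {
--         "0-100": sum(1 for l in lengths if l <= 100),
--         "101-500": sum(1 for l in lengths if 100 < l <= 500),
--         "501-1000": sum(1 for l in lengths if 500 < l <= 1000),
--         "1001-1500": sum(1 for l in lengths if 1000 < l <= 1500),
--         "1500+": sum(1 for l in lengths if l > 1500),
--     }
-- ===== Notes on version B (the rewrite author's own statement) =====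
-- stated objective: idiomatic
-- what changed: Replaces the single stateful loop that increments dict counters through an if/elif ladder by a dict literal of five independent per-bin predicate counts (sum of a generator per bin).
import Mathlib
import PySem

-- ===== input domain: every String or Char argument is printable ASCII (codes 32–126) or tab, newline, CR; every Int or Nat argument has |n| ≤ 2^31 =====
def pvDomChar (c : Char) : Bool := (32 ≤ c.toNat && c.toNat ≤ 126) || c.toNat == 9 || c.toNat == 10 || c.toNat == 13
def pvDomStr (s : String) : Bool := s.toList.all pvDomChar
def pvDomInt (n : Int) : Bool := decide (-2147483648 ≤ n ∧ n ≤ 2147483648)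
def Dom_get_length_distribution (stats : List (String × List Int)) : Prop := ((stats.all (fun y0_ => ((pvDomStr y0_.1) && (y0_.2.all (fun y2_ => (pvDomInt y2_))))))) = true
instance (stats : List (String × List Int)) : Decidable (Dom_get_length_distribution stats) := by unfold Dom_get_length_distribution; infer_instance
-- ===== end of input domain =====

-- B replaces A's single stateful counting loop by five independent per-bin predicate counts (idiomatic; same O(n) cost).

-- ===== PORT A =====
-- loop body of A: the if/elif ladder incrementing one dict entry
-- (all five keys are pre-inserted, so 'bins[k] += 1' = modify with any default)
def pvStepA (d : PySem.Dict String Int) (length : Int) : PySem.Dict String Int :=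
  if length ≤ 100 then d.modify "0-100" 0 (· + 1)
  else if length ≤ 500 then d.modify "101-500" 0 (· + 1)
  else if length ≤ 1000 then d.modify "501-1000" 0 (· + 1)
  else if length ≤ 1500 then d.modify "1001-1500" 0 (· + 1)
  else d.modify "1500+" 0 (· + 1)

def get_length_distribution (stats : List (String × List Int)) : List (String × Int) :=
  let lengths := (PySem.Dict.mk stats).getD "lengths" []
  if lengths = [] then []
  else
    let bins : PySem.Dict String Int :=
      PySem.Dict.ofList [("0-100", 0), ("101-500", 0), ("501-1000", 0), ("1001-1500", 0), ("1500+", 0)]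
    (lengths.foldl pvStepA bins).items

-- ===== PORT B =====
def get_length_distribution_alt (stats : List (String × List Int)) : List (String × Int) :=
  let lengths := (PySem.Dict.mk stats).getD "lengths" []
  if lengths = [] then []
  else
    [("0-100", (lengths.countP (fun l => decide (l ≤ 100)) : Int)),
     ("101-500", (lengths.countP (fun l => decide (100 < l ∧ l ≤ 500)) : Int)),
     ("501-1000", (lengths.countP (fun l => decide (500 < l ∧ l ≤ 1000)) : Int)),
     ("1001-1500", (lengths.countP (fun l => decide (1000 < l ∧ l ≤ 1500)) : Int)),
     ("1500+", (lengths.countP (fun l => decide (1500 < l)) : Int))]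

-- ===== PRECONDITION & SPEC =====
def Spec_get_length_distribution (stats : List (String × List Int)) (out : List (String × Int)) : Prop := out = get_length_distribution_alt stats
instance (stats : List (String × List Int)) (out : List (String × Int)) : Decidable (Spec_get_length_distribution stats out) := by unfold Spec_get_length_distribution; infer_instance

-- ===== CLAIM (what is proved, stated in full; the proofs are below) =====
def Claim_equal_get_length_distribution : Prop := ∀ (stats : List (String × List Int)), Dom_get_length_distribution stats → Spec_get_length_distribution stats (get_length_distribution stats)

-- ===== LEMMAS AND PROOFS =====

lemma foldA_items (ls : List Int) (a b c e f : Int) :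
    (ls.foldl pvStepA (PySem.Dict.mk [("0-100", a), ("101-500", b), ("501-1000", c), ("1001-1500", e), ("1500+", f)])).items =
      [("0-100", a + (ls.countP (fun l => decide (l ≤ 100)) : Int)),
       ("101-500", b + (ls.countP (fun l => decide (100 < l ∧ l ≤ 500)) : Int)),
       ("501-1000", c + (ls.countP (fun l => decide (500 < l ∧ l ≤ 1000)) : Int)),
       ("1001-1500", e + (ls.countP (fun l => decide (1000 < l ∧ l ≤ 1500)) : Int)),
       ("1500+", f + (ls.countP (fun l => decide (1500 < l)) : Int))] := by
  induction ls generalizing a b c e f with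
  | nil => simp
  | cons x xs ih =>
    rw [List.foldl_cons]
    by_cases h1 : x ≤ 100
    · have hs : pvStepA ⟨[("0-100", a), ("101-500", b), ("501-1000", c), ("1001-1500", e), ("1500+", f)]⟩ x
          = ⟨[("0-100", a + 1), ("101-500", b), ("501-1000", c), ("1001-1500", e), ("1500+", f)]⟩ := by
        simp [pvStepA, h1, PySem.Dict.modify, PySem.Dict.insert, PySem.Dict.contains,
          PySem.Dict.getD, PySem.Dict.get?]
      have n2 : ¬(100 < x) := by omega
      rw [hs, ih]
      simp [List.countP_cons, h1, n2]
      omega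
    · by_cases h2 : x ≤ 500
      · have hs : pvStepA ⟨[("0-100", a), ("101-500", b), ("501-1000", c), ("1001-1500", e), ("1500+", f)]⟩ x
            = ⟨[("0-100", a), ("101-500", b + 1), ("501-1000", c), ("1001-1500", e), ("1500+", f)]⟩ := by
          simp [pvStepA, h1, h2, PySem.Dict.modify, PySem.Dict.insert, PySem.Dict.contains,
            PySem.Dict.getD, PySem.Dict.get?]
        have n1 : 100 < x := by omega
        have n3 : ¬(500 < x) := by omega
        rw [hs, ih]
        simp [List.countP_cons, h1, h2, n1, n3]
        omega
      · by_cases h3 : x ≤ 1000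
        · have hs : pvStepA ⟨[("0-100", a), ("101-500", b), ("501-1000", c), ("1001-1500", e), ("1500+", f)]⟩ x
              = ⟨[("0-100", a), ("101-500", b), ("501-1000", c + 1), ("1001-1500", e), ("1500+", f)]⟩ := by
            simp [pvStepA, h1, h2, h3, PySem.Dict.modify, PySem.Dict.insert, PySem.Dict.contains,
              PySem.Dict.getD, PySem.Dict.get?]
          have n2 : 500 < x := by omega
          have n4 : ¬(1000 < x) := by omega
          rw [hs, ih]
          simp [List.countP_cons, h1, h2, h3, n2, n4]
          omega
        · by_cases h4 : x ≤ 1500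
          · have hs : pvStepA ⟨[("0-100", a), ("101-500", b), ("501-1000", c), ("1001-1500", e), ("1500+", f)]⟩ x
                = ⟨[("0-100", a), ("101-500", b), ("501-1000", c), ("1001-1500", e + 1), ("1500+", f)]⟩ := by
              simp [pvStepA, h1, h2, h3, h4, PySem.Dict.modify, PySem.Dict.insert, PySem.Dict.contains,
                PySem.Dict.getD, PySem.Dict.get?]
            have n3 : 1000 < x := by omega
            have n5 : ¬(1500 < x) := by omega
            rw [hs, ih]
            simp [h1, h2, h3, h4, n3, n5]
            omega
          · have hs : pvStepA ⟨[("0-100", a), ("101-500", b), ("501-1000", c), ("1001-1500", e), ("1500+", f)]⟩ x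
                = ⟨[("0-100", a), ("101-500", b), ("501-1000", c), ("1001-1500", e), ("1500+", f + 1)]⟩ := by
              simp [pvStepA, h1, h2, h3, h4, PySem.Dict.modify, PySem.Dict.insert, PySem.Dict.contains,
                PySem.Dict.getD, PySem.Dict.get?]
            have n5 : 1500 < x := by omega
            rw [hs, ih]
            simp [h1, h2, h3, h4, n5]
            omega

-- ===== VERDICT (by name: the statement is the Claim_ definition above) =====
theorem get_length_distribution_spec : Claim_equal_get_length_distribution := by
  intro stats _
  unfold Spec_get_length_distribution get_length_distribution get_length_distribution_alt
  set ls := (PySem.Dict.mk stats).getD "lengths" [] with hls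
  by_cases h : ls = []
  · simp [h]
  · simp only [if_neg h]
    have hof : (PySem.Dict.ofList [("0-100", (0:Int)), ("101-500", 0), ("501-1000", 0), ("1001-1500", 0), ("1500+", 0)])
        = PySem.Dict.mk [("0-100", 0), ("101-500", 0), ("501-1000", 0), ("1001-1500", 0), ("1500+", 0)] := by decide
    rw [hof, foldA_items]
    simp
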